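-- pv_equiv track=rewrite | github.com/chaeha617/AlgorithmStudy | Juhee_Python/12_SWEA/원재의 메모리 복구하기.py | solution
-- ===== SOURCE A (Python) =====
-- def solution(N, A):
--     count = 0
--     for i in range(len(N)):
--         if N[i] == A[i]:
--             continue
--         else:
--             for j in range(i, len(N)):
--                 A[j] = N[i]
--             count += 1
--     return count
-- ===== SOURCE B (Python) =====
-- def solution(N, A):
--     # Two-stage closed form: the first operation happens at the first index where
--     # N and A disagree; after it, every cell effectively holds the value of the
--     # last operation, so each later operation corresponds exactly to an adjacent
--     # change N[i] != N[i-1] in N's suffix. (Does not mutate A; same return value.)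
--     i0 = next((i for i, (n, a) in enumerate(zip(N, A)) if n != a), None)
--     if i0 is None:
--         return 0
--     tail = N[i0:]
--     return 1 + sum(1 for p, q in zip(tail, tail[1:]) if p != q)
-- ===== Notes on version B (the rewrite author's own statement) =====
-- stated objective: faster
-- what changed: B replaces A's quadratic suffix-rewriting loop with a closed-form two-stage scan: locate the first index where N and A disagree, then count adjacent changes N[i] != N[i-1] in N's suffix (each such change is exactly one operation); B does not mutate A.
import Mathlib
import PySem

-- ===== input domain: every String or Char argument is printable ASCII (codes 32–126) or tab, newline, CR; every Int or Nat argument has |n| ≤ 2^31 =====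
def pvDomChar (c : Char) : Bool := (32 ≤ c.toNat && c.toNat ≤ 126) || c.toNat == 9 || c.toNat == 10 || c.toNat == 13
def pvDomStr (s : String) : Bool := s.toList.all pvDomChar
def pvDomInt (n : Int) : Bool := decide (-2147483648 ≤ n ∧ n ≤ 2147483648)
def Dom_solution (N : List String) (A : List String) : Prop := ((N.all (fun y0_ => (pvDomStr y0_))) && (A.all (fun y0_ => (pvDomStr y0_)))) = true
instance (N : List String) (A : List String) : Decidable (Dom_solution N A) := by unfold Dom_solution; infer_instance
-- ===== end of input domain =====

-- B replaces A's quadratic suffix-rewriting loop by a closed-form two-stage scan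
-- (first mismatch, then adjacent changes in N's suffix); objective: faster.
-- Python A mutates its argument A in place; B does not — the equivalence proved
-- here is about the RETURN value only.

-- ===== PORT A =====
-- literal transliteration: state is (current contents of list A, count);
-- the inner loop 'for j in range(i, len(N)): A[j] = N[i]' is a fold of set over range' i (len N - i)
def solution (N : List String) (A : List String) : Int :=
  (List.foldl
    (fun (st : List String × Int) (i : Nat) =>
      if N.getD i "" == st.1.getD i "" then st
      else ((List.range' i (N.length - i)).foldl (fun acc j => acc.set j (N.getD i "")) st.1,
            st.2 + 1))
    (A, 0) (List.range N.length)).2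

-- ===== PORT B =====
-- 'next((i for i,(n,a) in enumerate(zip(N,A)) if n != a), None)': first mismatch offset
def pvFirstMismatch : List (String × String) → Option Nat
  | [] => none
  | (n, a) :: rest => if n != a then some 0 else (pvFirstMismatch rest).map (· + 1)

def solution_alt (N : List String) (A : List String) : Int :=
  match pvFirstMismatch (N.zip A) with
  | none => 0
  | some i0 =>
      let tail := N.drop i0
      1 + ((tail.zip tail.tail).countP (fun pq => pq.1 != pq.2) : Int)

-- ===== PRECONDITION & SPEC =====
-- Python A raises IndexError at A[i] when A is shorter than N; exactly those inputs are excluded.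
def Pre_solution (N : List String) (A : List String) : Prop := N.length ≤ A.length
instance (N : List String) (A : List String) : Decidable (Pre_solution N A) := by unfold Pre_solution; infer_instance
def pvWitness_solution : List String × List String := (["a", "b"], ["b", "b"])
def Spec_solution (N : List String) (A : List String) (out : Int) : Prop := out = solution_alt N A
instance (N : List String) (A : List String) (out : Int) : Decidable (Spec_solution N A out) := by unfold Spec_solution; infer_instance

-- ===== CLAIM (what is proved, stated in full; the proofs are below) =====
def Claim_equal_solution : Prop := ∀ (N : List String) (A : List String), Dom_solution N A → Pre_solution N A → Spec_solution N A (solution N A)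

-- ===== LEMMAS AND PROOFS =====

-- intermediate model of A's loop: (last written value, count) instead of the list contents
def pvCurStep (N A : List String) (st : Option String × Int) (i : Nat) : Option String × Int :=
  if N.getD i "" != st.1.getD (A.getD i "") then (some (N.getD i ""), st.2 + 1) else st

-- number of adjacent unequal pairs, recursively
def pvCountAdj : List String → Int
  | x :: y :: rest => (if x != y then (1 : Int) else 0) + pvCountAdj (y :: rest)
  | _ => 0

theorem pvCountAdj_eq_countP :
    ∀ (L : List String), pvCountAdj L = ((L.zip L.tail).countP (fun pq => pq.1 != pq.2) : Nat) := by
  intro L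
  match L with
  | [] => simp [pvCountAdj]
  | [x] => simp [pvCountAdj]
  | x :: y :: rest =>
      have ih := pvCountAdj_eq_countP (y :: rest)
      simp only [pvCountAdj, List.tail_cons, List.zip_cons_cons, List.countP_cons, ih]
      by_cases h : x = y <;> simp [h] <;> ring

theorem pvSetFold_length (v : String) :
    ∀ (k s : Nat) (L : List String),
      ((List.range' s k).foldl (fun acc j => acc.set j v) L).length = L.length := by
  intro k
  induction k with
  | zero => intro s L; simp
  | succ k ih =>
      intro s L
      rw [List.range'_succ]
      simp only [List.foldl_cons]
      rw [ih]
      simp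

theorem pvSetFold_untouched (v : String) :
    ∀ (k s m : Nat) (L : List String), m < s →
      ((List.range' s k).foldl (fun acc j => acc.set j v) L).getD m "" = L.getD m "" := by
  intro k
  induction k with
  | zero => intro s m L _; simp
  | succ k ih =>
      intro s m L hlt
      rw [List.range'_succ]
      simp only [List.foldl_cons]
      rw [ih (s + 1) m _ (by omega)]
      simp [List.getD, List.getElem?_set_ne (by omega : s ≠ m)]

theorem pvSetFold_getD (v : String) :
    ∀ (k s m : Nat) (L : List String), s ≤ m → m < s + k → m < L.length →
      ((List.range' s k).foldl (fun acc j => acc.set j v) L).getD m "" = v := by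
  intro k
  induction k with
  | zero => intro s m L h1 h2 _; omega
  | succ k ih =>
      intro s m L h1 h2 h3
      rw [List.range'_succ]
      simp only [List.foldl_cons]
      by_cases hm : m = s
      · subst hm
        rw [pvSetFold_untouched v k (m + 1) m _ (by omega)]
        simp [List.getD, h3]
      · exact ih (s + 1) m _ (by omega) (by omega) (by simpa using h3)

-- A's list-rewriting fold equals the (cur, count) fold
theorem pvMain (N A : List String) :
    ∀ (k s : Nat) (L : List String) (cur : Option String) (c : Int),
      s + k = N.length → N.length ≤ A.length → L.length = A.length →
      (∀ j, s ≤ j → j < N.length → L.getD j "" = cur.getD (A.getD j "")) →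
      ((List.range' s k).foldl
        (fun (st : List String × Int) (i : Nat) =>
          if N.getD i "" == st.1.getD i "" then st
          else ((List.range' i (N.length - i)).foldl (fun acc j => acc.set j (N.getD i "")) st.1,
                st.2 + 1)) (L, c)).2
      =
      ((List.range' s k).foldl (pvCurStep N A) (cur, c)).2 := by
  intro k
  induction k with
  | zero => intro s L cur c _ _ _ _; simp
  | succ k ih =>
      intro s L cur c hk hNA hL hinv
      rw [List.range'_succ]
      simp only [List.foldl_cons, pvCurStep]
      have hs : s < N.length := by omega
      have heff : L.getD s "" = cur.getD (A.getD s "") := hinv s (le_refl s) hs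
      by_cases heq : N.getD s "" = cur.getD (A.getD s "")
      · have h1 : (N.getD s "" == L.getD s "") = true := by rw [heff]; exact beq_iff_eq.mpr heq
        have h2 : (N.getD s "" != cur.getD (A.getD s "")) = false :=
          bne_eq_false_iff_eq.mpr heq
        simp only [h1, if_true, h2, Bool.false_eq_true, if_false]
        exact ih (s + 1) L cur c (by omega) hNA hL
          (fun j hj1 hj2 => hinv j (by omega) hj2)
      · have h1 : (N.getD s "" == L.getD s "") = false := by
          rw [heff]; exact beq_eq_false_iff_ne.mpr heq
        have h2 : (N.getD s "" != cur.getD (A.getD s "")) = true :=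
          bne_iff_ne.mpr heq
        simp only [h1, Bool.false_eq_true, if_false, h2, if_true]
        apply ih (s + 1)
        · omega
        · exact hNA
        · rw [pvSetFold_length]; exact hL
        · intro j hj1 hj2
          rw [pvSetFold_getD (N.getD s "") (N.length - s) s j L (by omega) (by omega)
            (by omega)]
          simp

-- after the first write, the (cur, count) fold counts adjacent changes
theorem pvSomePhase (N A : List String) :
    ∀ (k s : Nat) (v : String) (c : Int), s + k = N.length →
      ((List.range' s k).foldl (pvCurStep N A) (some v, c)).2 = c + pvCountAdj (v :: N.drop s) := by
  intro k
  induction k with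
  | zero =>
      intro s v c hk
      rw [List.drop_eq_nil_of_le (by omega)]
      simp [pvCountAdj]
  | succ k ih =>
      intro s v c hk
      have hs : s < N.length := by omega
      have hdrop : N.drop s = N[s] :: N.drop (s + 1) := (List.getElem_cons_drop hs).symm
      have hget : N.getD s "" = N[s] := List.getD_eq_getElem N "" hs
      rw [List.range'_succ]
      simp only [List.foldl_cons, pvCurStep, Option.getD_some, hget]
      by_cases h : N[s] = v
      · have hb : (N[s] != v) = false := bne_eq_false_iff_eq.mpr h
        simp only [hb, Bool.false_eq_true, if_false]
        rw [ih (s + 1) v c (by omega), hdrop, ← h]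
        simp [pvCountAdj]
      · have hb : (N[s] != v) = true := bne_iff_ne.mpr h
        simp only [hb, if_true]
        rw [ih (s + 1) N[s] (c + 1) (by omega), hdrop]
        have hvb : (v != N[s]) = true := bne_iff_ne.mpr (fun e => h e.symm)
        simp only [pvCountAdj, hvb, if_true]
        ring

-- before any write, the (cur, count) fold matches B's closed form
theorem pvNonePhase (N A : List String) (hNA : N.length ≤ A.length) :
    ∀ (k s : Nat) (c : Int), s + k = N.length →
      ((List.range' s k).foldl (pvCurStep N A) (none, c)).2 =
        c + (match pvFirstMismatch ((N.drop s).zip (A.drop s)) with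
             | none => 0
             | some d => 1 + pvCountAdj (N.drop (s + d))) := by
  intro k
  induction k with
  | zero =>
      intro s c hk
      rw [List.drop_eq_nil_of_le (as := N) (by omega)]
      simp [pvFirstMismatch]
  | succ k ih =>
      intro s c hk
      have hs : s < N.length := by omega
      have hsA : s < A.length := by omega
      have hdN : N.drop s = N[s] :: N.drop (s + 1) := (List.getElem_cons_drop hs).symm
      have hdA : A.drop s = A[s] :: A.drop (s + 1) := (List.getElem_cons_drop hsA).symm
      have hgN : N.getD s "" = N[s] := List.getD_eq_getElem N "" hs
      have hgA : A.getD s "" = A[s] := List.getD_eq_getElem A "" hsA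
      rw [List.range'_succ]
      simp only [List.foldl_cons, pvCurStep, Option.getD_none, hgN, hgA, hdN, hdA,
        List.zip_cons_cons, pvFirstMismatch]
      by_cases h : N[s] = A[s]
      · have hb : (N[s] != A[s]) = false := bne_eq_false_iff_eq.mpr h
        simp only [hb, Bool.false_eq_true, if_false]
        rw [ih (s + 1) c (by omega)]
        cases hfm : pvFirstMismatch ((N.drop (s + 1)).zip (A.drop (s + 1))) with
        | none => simp [Option.map]
        | some d =>
            simp only [Option.map_some]
            have : s + (d + 1) = s + 1 + d := by omega
            rw [this]
      · have hb : (N[s] != A[s]) = true := bne_iff_ne.mpr h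
        simp only [hb, if_true]
        rw [pvSomePhase N A k (s + 1) N[s] (c + 1) (by omega)]
        have : N.drop (s + 0) = N[s] :: N.drop (s + 1) := by rw [Nat.add_zero]; exact hdN
        rw [this]
        ring

-- ===== VERDICT (by name: the statement is the Claim_ definition above) =====
theorem solution_spec : Claim_equal_solution := by
  intro N A _ hpre
  unfold Spec_solution solution
  rw [List.range_eq_range',
    pvMain N A N.length 0 A none 0 (by omega) hpre rfl (fun j _ _ => by simp),
    pvNonePhase N A hpre N.length 0 0 (by omega)]
  unfold solution_alt
  simp only [List.drop_zero, zero_add]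
  cases hfm : pvFirstMismatch (N.zip A) with
  | none => simp
  | some i0 => simp [pvCountAdj_eq_countP]
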